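-- pv_equiv track=rewrite | github.com/hrssurt/lintcode | 598  Zombie in Matrix.py | zombie
-- ===== SOURCE A (Python) =====
-- def zombie(grid):
--     if not grid or not grid[0]:
--         return -1
--     W, Z, P = 2, 1, 0
--     DX, DY = [0,1,0,-1], [1, 0, -1, 0]
--     def is_valid(x, y, grid):
--         return x >= 0 and y >= 0 and x < len(grid) and y < len(grid[0]) and grid[x][y] == P
--
--
--     # use bfs
--     q, day = [], 0
--     alive = set()
--     for i in range(len(grid)):
--         for j in range(len(grid[0])):
--             if grid[i][j] == Z:
--                 q.append((i,j))
--             if grid[i][j] == P: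
--                 alive.add((i,j))
--     while q:
--         size = len(q)
--         for _ in range(size):
--             x, y = q.pop(0)
--             for dx, dy in zip(DX, DY):
--                 nx, ny = x + dx, y + dy
--                 if is_valid(nx, ny, grid):
--                     grid[nx][ny] = Z
--                     q.append((nx, ny))
--                     alive.remove((nx, ny))
--         day += 1
--         if not alive:
--             return day
--     return -1
-- ===== SOURCE B (Python) =====
-- def zombie(grid):
--     if not grid or not grid[0]:
--         return -1
--     h, w = len(grid), len(grid[0])
--     if not any(grid[i][j] == 1 for i in range(h) for j in range(w)):
--         return -1
--     day = 0
--     while True: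
--         day += 1
--         targets = [(i, j)
--                    for i in range(h) for j in range(w)
--                    if grid[i][j] == 0
--                    and any(0 <= i + dx < h and 0 <= j + dy < w and grid[i + dx][j + dy] == 1
--                            for dx, dy in ((0, 1), (1, 0), (0, -1), (-1, 0)))]
--         for i, j in targets:
--             grid[i][j] = 1
--         if not any(grid[i][j] == 0 for i in range(h) for j in range(w)):
--             return day
--         if not targets:
--             return -1
-- ===== Notes on version B (the rewrite author's own statement) =====
-- stated objective: alternative
-- what changed: Replaces A's queue-based level BFS (with an alive-set bookkeeping structure) by a queue-free day-by-day simulation that rescans the grid each day, simultaneously infecting every empty cell adjacent to a zombie until none remain or no progress is made.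
import Mathlib
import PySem

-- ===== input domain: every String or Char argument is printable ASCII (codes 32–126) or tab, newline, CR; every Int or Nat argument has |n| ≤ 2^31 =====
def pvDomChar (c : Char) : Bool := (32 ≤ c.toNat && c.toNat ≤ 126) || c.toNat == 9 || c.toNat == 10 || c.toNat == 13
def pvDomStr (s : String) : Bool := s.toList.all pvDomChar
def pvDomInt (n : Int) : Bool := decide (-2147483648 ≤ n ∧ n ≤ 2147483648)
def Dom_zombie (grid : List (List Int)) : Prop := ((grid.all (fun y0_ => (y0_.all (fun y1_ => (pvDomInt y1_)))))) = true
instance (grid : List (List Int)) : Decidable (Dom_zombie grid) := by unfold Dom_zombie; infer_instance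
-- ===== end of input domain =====

-- B replaces A's queue-level BFS by a queue-free day-by-day simulation (scan & simultaneous marking); both mutate grid identically, equivalence is about the return value.


-- shared grid primitives (both Pythons read/write grid[x][y] the same way)
-- grid[x][y]; the defaults are unreachable under Pre_zombie (both programs bounds-check first)
def pvCellD (g : List (List Int)) (x y : Int) : Int :=
  PySem.List.pyGetD (PySem.List.pyGetD g x []) y 2

-- grid[x][y] = v
def pvSetCell (g : List (List Int)) (x y : Int) (v : Int) : List (List Int) :=
  PySem.List.pySetD g x (PySem.List.pySetD (PySem.List.pyGetD g x []) y v)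

-- zip(DX, DY) = ((0,1),(1,0),(0,-1),(-1,0))
def pvDirs : List (Int × Int) := [(0,1),(1,0),(0,-1),(-1,0)]

-- ===== PORT A =====
def pvIsValid (x y : Int) (g : List (List Int)) : Bool :=
  decide (0 ≤ x) && decide (0 ≤ y) && decide (x < (g.length : Int)) &&
    decide (y < ((g.headD []).length : Int)) && (pvCellD g x y == 0)

-- the seeding double loop: q collects zombie cells, alive the person cells
def pvSeed (g : List (List Int)) : List (Int × Int) × PySem.Set (Int × Int) :=
  (List.range g.length).foldl (fun st (i : Nat) =>
    (List.range (g.headD []).length).foldl (fun st (j : Nat) =>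
      let c := pvCellD g (i : Int) (j : Int)
      ((if c == 1 then st.1 ++ [((i : Int), (j : Int))] else st.1),
       (if c == 0 then PySem.Set.add st.2 ((i : Int), (j : Int)) else st.2))) st)
    ([], [])

-- the 'for dx, dy in zip(DX, DY)' body for one popped (x, y)
-- alive.remove: the removed cell is always present (it is a person cell), so KeyError is impossible; discard is exact here
def pvVisit (st : List (List Int) × List (Int × Int) × PySem.Set (Int × Int)) (x y : Int) :
    List (List Int) × List (Int × Int) × PySem.Set (Int × Int) :=
  pvDirs.foldl (fun st d =>
    let nx := x + d.1
    let ny := y + d.2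
    if pvIsValid nx ny st.1 then
      (pvSetCell st.1 nx ny 1, st.2.1 ++ [(nx, ny)], PySem.Set.discard st.2.2 (nx, ny))
    else st) st

-- 'for _ in range(size): x, y = q.pop(0); …'  (q is never empty here: size = len(q) and the loop only appends)
def pvLevel : Nat → List (List Int) × List (Int × Int) × PySem.Set (Int × Int) →
    List (List Int) × List (Int × Int) × PySem.Set (Int × Int)
  | 0, st => st
  | n + 1, st =>
    match st.2.1 with
    | [] => st
    | c :: rest => pvLevel n (pvVisit (st.1, rest, st.2.2) c.1 c.2)

-- the 'while q:' loop; fuel = h*w+1 is provably enough (each iteration that recurses kills a person cell)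
def pvALoop : Nat → List (List Int) → List (Int × Int) → PySem.Set (Int × Int) → Int → Int
  | 0, _, _, _, _ => -1
  | fuel + 1, g, q, al, day =>
    if q.isEmpty then -1
    else
      let st := pvLevel q.length (g, q, al)
      if st.2.2.isEmpty then day + 1
      else pvALoop fuel st.1 st.2.1 st.2.2 (day + 1)

def zombie (grid : List (List Int)) : Int :=
  if grid.isEmpty || (grid.headD []).isEmpty then -1
  else
    let s := pvSeed grid
    pvALoop (grid.length * (grid.headD []).length + 1) grid s.1 s.2 0

-- ===== PORT B =====
-- any(grid[i][j] == v …) scan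
def pvAnyCell (g : List (List Int)) (h w : Nat) (v : Int) : Bool :=
  (List.range h).any (fun (i : Nat) => (List.range w).any (fun (j : Nat) => pvCellD g (i : Int) (j : Int) == v))

-- the 'any(… == 1 …)' neighbour test
def pvHasZnbr (g : List (List Int)) (h w : Nat) (i j : Int) : Bool :=
  pvDirs.any (fun d =>
    decide (0 ≤ i + d.1) && decide (i + d.1 < (h : Int)) &&
      decide (0 ≤ j + d.2) && decide (j + d.2 < (w : Int)) && (pvCellD g (i + d.1) (j + d.2) == 1))

-- the targets comprehension
def pvTargets (g : List (List Int)) (h w : Nat) : List (Int × Int) :=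
  (List.range h).flatMap (fun (i : Nat) =>
    (List.range w).filterMap (fun (j : Nat) =>
      if pvCellD g (i : Int) (j : Int) == 0 && pvHasZnbr g h w (i : Int) (j : Int) then
        some ((i : Int), (j : Int))
      else none))

-- 'for i, j in targets: grid[i][j] = 1'
def pvMark (g : List (List Int)) (ts : List (Int × Int)) : List (List Int) :=
  ts.foldl (fun g c => pvSetCell g c.1 c.2 1) g

-- the 'while True:' day loop; fuel = h*w+1 is provably enough (each iteration that recurses kills a person cell)
def pvBLoop : Nat → List (List Int) → Nat → Nat → Int → Int
  | 0, _, _, _, _ => -1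
  | fuel + 1, g, h, w, day =>
    let ts := pvTargets g h w
    let g' := pvMark g ts
    if !pvAnyCell g' h w 0 then day + 1
    else if ts.isEmpty then -1
    else pvBLoop fuel g' h w (day + 1)

def zombie_alt (grid : List (List Int)) : Int :=
  if grid.isEmpty || (grid.headD []).isEmpty then -1
  else
    let h := grid.length
    let w := (grid.headD []).length
    if !pvAnyCell grid h w 1 then -1
    else pvBLoop (h * w + 1) grid h w 0

-- ===== PRECONDITION & SPEC =====
-- Pre_ excludes exactly the ragged grids on which Python A raises IndexError (a row shorter than row 0,
-- indexed with len(grid[0]) columns); B raises there too.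
def Pre_zombie (grid : List (List Int)) : Prop :=
  ∀ row ∈ grid, (grid.headD []).length ≤ row.length
instance (grid : List (List Int)) : Decidable (Pre_zombie grid) := by unfold Pre_zombie; infer_instance

def pvWitness_zombie : List (List Int) := [[1, 0], [0, 0]]

def Spec_zombie (grid : List (List Int)) (out : Int) : Prop := out = zombie_alt grid
instance (grid : List (List Int)) (out : Int) : Decidable (Spec_zombie grid out) := by unfold Spec_zombie; infer_instance

-- ===== CLAIM (what is proved, stated in full; the proofs are below) =====
def Claim_equal_zombie : Prop := ∀ (grid : List (List Int)), Dom_zombie grid → Pre_zombie grid → Spec_zombie grid (zombie grid)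

-- ===== LEMMAS AND PROOFS =====

-- proof-side abstractions
def pvShape (g : List (List Int)) (h w : Nat) : Prop :=
  g.length = h ∧ (g.headD []).length = w ∧ ∀ row ∈ g, w ≤ row.length

def pvInB (h w : Nat) (c : Int × Int) : Prop :=
  0 ≤ c.1 ∧ c.1 < (h : Int) ∧ 0 ≤ c.2 ∧ c.2 < (w : Int)

def pvNbrs (c : Int × Int) : List (Int × Int) := pvDirs.map (fun d => (c.1 + d.1, c.2 + d.2))

def pvDAll (al : PySem.Set (Int × Int)) (m : List (Int × Int)) : PySem.Set (Int × Int) :=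
  m.foldl PySem.Set.discard al

def pvLvlMarks (g : List (List Int)) : List (Int × Int) → List (Int × Int)
  | [] => []
  | c :: Q =>
    let m := (pvNbrs c).filter (fun n => pvIsValid n.1 n.2 g)
    m ++ pvLvlMarks (pvMark g m) Q

def pvCoords (h w : Nat) : List (Int × Int) :=
  (List.range h).flatMap (fun (i : Nat) => (List.range w).map (fun (j : Nat) => ((i : Int), (j : Int))))

def pvPcnt (g : List (List Int)) (h w : Nat) : Nat :=
  (pvCoords h w).countP (fun c => pvCellD g c.1 c.2 == 0)

lemma pvInB_cast {h w : Nat} {c : Int × Int} (hc : pvInB h w c) :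
    ∃ a b : Nat, c = ((a : Int), (b : Int)) ∧ a < h ∧ b < w := by
  obtain ⟨h1, h2, h3, h4⟩ := hc
  refine ⟨c.1.toNat, c.2.toNat, ?_, by omega, by omega⟩
  ext <;> simp <;> omega

lemma pv_set_eq {g : List (List Int)} {h w : Nat} {c : Int × Int}
    (hs : pvShape g h w) (hc : pvInB h w c) (v : Int) :
    pvSetCell g c.1 c.2 v = g.set c.1.toNat ((g.getD c.1.toNat []).set c.2.toNat v) := by
  obtain ⟨a, b, rfl, ha, hb⟩ := pvInB_cast hc
  obtain ⟨hlen, hw0, hrow⟩ := hs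
  have hrl : b < (g.getD a []).length := by
    have : g.getD a [] ∈ g := by
      have : a < g.length := by omega
      simp [List.getD_eq_getElem?_getD, List.getElem?_eq_getElem this]
    have := hrow _ this
    omega
  simp only [pvSetCell, PySem.List.pySetD, PySem.List.pyGetD_natCast]
  rw [PySem.List.pySet?_natCast _ _ _ hrl, PySem.List.pySet?_natCast _ _ _ (by omega)]
  simp

lemma pv_getD_mem {g : List (List Int)} {a : Nat} (ha : a < g.length) : g.getD a [] ∈ g := by
  simp [List.getD_eq_getElem?_getD, List.getElem?_eq_getElem ha]

lemma pv_headD_eq_getD (g : List (List Int)) : g.headD [] = g.getD 0 [] := by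
  cases g <;> simp

lemma pv_shape_set {g : List (List Int)} {h w : Nat} {c : Int × Int}
    (hs : pvShape g h w) (hc : pvInB h w c) (v : Int) :
    pvShape (pvSetCell g c.1 c.2 v) h w := by
  rw [pv_set_eq hs hc]
  obtain ⟨a, b, rfl, ha, hb⟩ := pvInB_cast hc
  obtain ⟨hlen, hw0, hrow⟩ := hs
  simp only [Int.toNat_natCast]
  have hag : a < g.length := by omega
  have hwrow : ∀ a' : Nat, a' < g.length → (g.getD a' []).length = w ∨ w ≤ (g.getD a' []).length := by
    intro a' ha'
    exact Or.inr (hrow _ (pv_getD_mem ha'))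
  refine ⟨by simp [hlen], ?_, ?_⟩
  · rw [pv_headD_eq_getD] at hw0 ⊢
    by_cases h0 : a = 0
    · subst h0
      simpa [List.getD_eq_getElem?_getD, List.getElem?_set_self hag] using hw0
    · simpa [List.getD_eq_getElem?_getD, List.getElem?_set_ne (show a ≠ 0 from h0)] using hw0
  · intro row hmem
    rcases List.mem_or_eq_of_mem_set hmem with hm | rfl
    · exact hrow _ hm
    · simpa using hrow _ (pv_getD_mem hag)

lemma pv_cell_set {g : List (List Int)} {h w : Nat} {x c : Int × Int}
    (hs : pvShape g h w) (hx : pvInB h w x) (hc : pvInB h w c) (v : Int) :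
    pvCellD (pvSetCell g x.1 x.2 v) c.1 c.2 = if c = x then v else pvCellD g c.1 c.2 := by
  rw [pv_set_eq hs hx]
  obtain ⟨a, b, rfl, ha, hb⟩ := pvInB_cast hx
  obtain ⟨a', b', rfl, ha', hb'⟩ := pvInB_cast hc
  obtain ⟨hlen, hw0, hrow⟩ := hs
  have hag : a < g.length := by omega
  simp only [Int.toNat_natCast, pvCellD, PySem.List.pyGetD_natCast, Prod.mk.injEq,
    Int.natCast_inj]
  by_cases hrow_eq : a' = a
  · subst hrow_eq
    rw [List.getD_eq_getElem?_getD (l := g.set a' _), List.getElem?_set_self (by omega)]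
    by_cases hcol : b' = b
    · subst hcol
      have hbl : b' < (g.getD a' []).length := by
        have := hrow _ (pv_getD_mem hag); omega
      simp [List.getD_eq_getElem?_getD,
        List.getElem?_set_self (show b' < ((g[a']?).getD []).length by
          simpa [List.getD_eq_getElem?_getD] using hbl)]
    · simp [List.getD_eq_getElem?_getD, List.getElem?_set_ne (show b ≠ b' from fun hh => hcol hh.symm), hcol]
  · rw [List.getD_eq_getElem?_getD (l := g.set a _), List.getElem?_set_ne (show a ≠ a' from fun hh => hrow_eq hh.symm), ← List.getD_eq_getElem?_getD]
    simp [hrow_eq]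

lemma pv_set_comm {g : List (List Int)} {h w : Nat} {x y : Int × Int}
    (hs : pvShape g h w) (hx : pvInB h w x) (hy : pvInB h w y) (v v' : Int) (hne : x ≠ y) :
    pvSetCell (pvSetCell g x.1 x.2 v) y.1 y.2 v' = pvSetCell (pvSetCell g y.1 y.2 v') x.1 x.2 v := by
  have hsx := pv_shape_set hs hx v
  have hsy := pv_shape_set hs hy v'
  rw [pv_set_eq hsx hy, pv_set_eq hsy hx, pv_set_eq hs hx, pv_set_eq hs hy]
  obtain ⟨a, b, rfl, ha, hb⟩ := pvInB_cast hx
  obtain ⟨a', b', rfl, ha', hb'⟩ := pvInB_cast hy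
  obtain ⟨hlen, hw0, hrow⟩ := hs
  have hag : a < g.length := by omega
  have hag' : a' < g.length := by omega
  simp only [Int.toNat_natCast]
  by_cases hr : a = a'
  · subst hr
    have hbb : b ≠ b' := by
      intro hh; exact hne (by simp [hh])
    rw [List.getD_eq_getElem?_getD (l := g.set a _), List.getElem?_set_self hag,
        List.getD_eq_getElem?_getD (l := g.set a _), List.getElem?_set_self hag]
    simp only [Option.getD_some]
    rw [List.set_set, List.set_set, List.set_comm _ _ hbb]
  · rw [List.getD_eq_getElem?_getD (l := g.set a _), List.getElem?_set_ne hr,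
        List.getD_eq_getElem?_getD (l := g.set a' _), List.getElem?_set_ne (fun hh => hr hh.symm),
        ← List.getD_eq_getElem?_getD, ← List.getD_eq_getElem?_getD]
    exact List.set_comm _ _ (by omega)

lemma pv_isValid_iff {g : List (List Int)} {h w : Nat} (hs : pvShape g h w) (x y : Int) :
    pvIsValid x y g = true ↔ pvInB h w (x, y) ∧ pvCellD g x y = 0 := by
  obtain ⟨hlen, hw0, hrow⟩ := hs
  have hw' : (g.head?.getD []).length = w := by cases g <;> simp_all
  simp only [pvIsValid, pvInB, Bool.and_eq_true, decide_eq_true_eq, beq_iff_eq, hlen,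
    List.headD_eq_head?_getD, hw']
  tauto

-- cells written by pvMark
lemma pv_shape_mark {g : List (List Int)} {h w : Nat} {ts : List (Int × Int)}
    (hs : pvShape g h w) (hts : ∀ t ∈ ts, pvInB h w t) :
    pvShape (pvMark g ts) h w := by
  induction ts generalizing g with
  | nil => simpa [pvMark] using hs
  | cons t ts ih =>
    simp only [pvMark, List.foldl_cons]
    exact ih (pv_shape_set hs (hts t (by simp)) 1) (fun t' ht' => hts t' (by simp [ht']))

lemma pv_cell_mark {g : List (List Int)} {h w : Nat} {ts : List (Int × Int)} {c : Int × Int}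
    (hs : pvShape g h w) (hts : ∀ t ∈ ts, pvInB h w t) (hc : pvInB h w c) :
    pvCellD (pvMark g ts) c.1 c.2 = if c ∈ ts then 1 else pvCellD g c.1 c.2 := by
  induction ts generalizing g with
  | nil => simp [pvMark]
  | cons t ts ih =>
    simp only [pvMark, List.foldl_cons]
    rw [show List.foldl (fun g c => pvSetCell g c.1 c.2 1) (pvSetCell g t.1 t.2 1) ts
          = pvMark (pvSetCell g t.1 t.2 1) ts from rfl]
    rw [ih (pv_shape_set hs (hts t (by simp)) 1) (fun t' ht' => hts t' (by simp [ht'])),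
        pv_cell_set hs (hts t (by simp)) hc]
    by_cases hmem : c ∈ ts <;> by_cases hct : c = t <;> simp [hmem, hct]

lemma pv_mark_append (g : List (List Int)) (m M : List (Int × Int)) :
    pvMark g (m ++ M) = pvMark (pvMark g m) M := by
  simp [pvMark]

lemma pv_mark_perm {g : List (List Int)} {h w : Nat} {ts ts' : List (Int × Int)}
    (hs : pvShape g h w) (hts : ∀ t ∈ ts, pvInB h w t) (hperm : ts.Perm ts') :
    pvMark g ts = pvMark g ts' := by
  induction hperm generalizing g with
  | nil => rfl
  | cons x _ ih =>
    simp only [pvMark, List.foldl_cons]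
    exact ih (pv_shape_set hs (hts x (by simp)) 1) (fun t ht => hts t (by simp [ht]))
  | swap x y l =>
    by_cases hxy : x = y
    · simp [hxy]
    · simp only [pvMark, List.foldl_cons]
      rw [pv_set_comm hs (hts y (by simp)) (hts x (by simp)) 1 1 (fun hh => hxy (hh.symm))]
  | trans h₁ h₂ ih₁ ih₂ =>
    rw [ih₁ hs hts, ih₂ hs (fun t ht => hts t (h₁.mem_iff.mpr ht))]

lemma pv_dall_mem (al : PySem.Set (Int × Int)) (m : List (Int × Int)) (c : Int × Int) :
    c ∈ pvDAll al m ↔ c ∈ al ∧ c ∉ m := by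
  induction m generalizing al with
  | nil => simp [pvDAll]
  | cons x m ih =>
    simp only [pvDAll, List.foldl_cons]
    rw [show List.foldl PySem.Set.discard (PySem.Set.discard al x) m = pvDAll (PySem.Set.discard al x) m from rfl]
    rw [ih, PySem.Set.mem_discard]
    simp only [List.mem_cons]
    tauto

lemma pv_isValid_set_ne {g : List (List Int)} {h w : Nat} {y c : Int × Int}
    (hs : pvShape g h w) (hcB : pvInB h w c) (hyc : y ≠ c) :
    pvIsValid y.1 y.2 (pvSetCell g c.1 c.2 1) = pvIsValid y.1 y.2 g := by
  have hs' := pv_shape_set hs hcB 1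
  rw [Bool.eq_iff_iff, pv_isValid_iff hs', pv_isValid_iff hs]
  by_cases hyB : pvInB h w y
  · rw [pv_cell_set hs hcB hyB 1]
    simp [hyc]
  · simp only [show ((y.1, y.2) : Int × Int) = y from rfl]
    tauto

lemma pv_seq {h w : Nat} :
    ∀ (cands : List (Int × Int)) (g : List (List Int)) (qq : List (Int × Int))
      (al : PySem.Set (Int × Int)), pvShape g h w → cands.Pairwise (· ≠ ·) →
    cands.foldl (fun st c =>
        if pvIsValid c.1 c.2 st.1 then
          (pvSetCell st.1 c.1 c.2 1, st.2.1 ++ [c], PySem.Set.discard st.2.2 c)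
        else st) (g, qq, al)
      = (pvMark g (cands.filter (fun c => pvIsValid c.1 c.2 g)),
         qq ++ cands.filter (fun c => pvIsValid c.1 c.2 g),
         pvDAll al (cands.filter (fun c => pvIsValid c.1 c.2 g))) := by
  intro cands
  induction cands with
  | nil => intro g qq al _ _; simp [pvMark, pvDAll]
  | cons c cs ih =>
    intro g qq al hs hpw
    have hne : ∀ y ∈ cs, c ≠ y := (List.pairwise_cons.mp hpw).1
    have hpw' : cs.Pairwise (· ≠ ·) := (List.pairwise_cons.mp hpw).2
    by_cases hv : pvIsValid c.1 c.2 g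
    · have hcB : pvInB h w c := by
        have := (pv_isValid_iff hs c.1 c.2).mp hv
        simpa using this.1
      have hfc : cs.filter (fun y => pvIsValid y.1 y.2 (pvSetCell g c.1 c.2 1))
          = cs.filter (fun y => pvIsValid y.1 y.2 g) := by
        apply List.filter_congr
        intro y hy
        exact pv_isValid_set_ne hs hcB (fun hh => (hne y hy) hh.symm)
      simp only [List.foldl_cons, hv, if_pos]
      rw [ih _ _ _ (pv_shape_set hs hcB 1) hpw', hfc,
        show List.filter (fun y => pvIsValid y.1 y.2 g) (c :: cs)
            = c :: List.filter (fun y => pvIsValid y.1 y.2 g) cs from List.filter_cons_of_pos hv]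
      refine congrArg₂ _ ?_ (congrArg₂ _ ?_ ?_) <;> simp [pvMark, pvDAll]
    · have hfil : List.filter (fun y => pvIsValid y.1 y.2 g) (c :: cs)
          = List.filter (fun y => pvIsValid y.1 y.2 g) cs := List.filter_cons_of_neg (by simpa using hv)
      simp only [List.foldl_cons, hv, if_neg, Bool.false_eq_true, not_false_iff]
      rw [hfil]
      exact ih _ _ _ hs hpw'

lemma pv_nbrs_pairwise (c : Int × Int) : (pvNbrs c).Pairwise (· ≠ ·) := by
  simp [pvNbrs, pvDirs, List.pairwise_cons, Prod.ext_iff]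
  exact ⟨by intros; omega, by intros; omega⟩

lemma pv_visit_eq {g : List (List Int)} {h w : Nat} {qq : List (Int × Int)}
    {al : PySem.Set (Int × Int)} (hs : pvShape g h w) (c : Int × Int) :
    pvVisit (g, qq, al) c.1 c.2
      = (pvMark g ((pvNbrs c).filter (fun n => pvIsValid n.1 n.2 g)),
         qq ++ (pvNbrs c).filter (fun n => pvIsValid n.1 n.2 g),
         pvDAll al ((pvNbrs c).filter (fun n => pvIsValid n.1 n.2 g))) := by
  have hfold : pvVisit (g, qq, al) c.1 c.2
      = (pvNbrs c).foldl (fun st n =>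
          if pvIsValid n.1 n.2 st.1 then
            (pvSetCell st.1 n.1 n.2 1, st.2.1 ++ [n], PySem.Set.discard st.2.2 n)
          else st) (g, qq, al) := by
    simp [pvVisit, pvNbrs, List.foldl_map]
  rw [hfold, pv_seq _ _ _ _ hs (pv_nbrs_pairwise c)]

lemma pv_marks_inB {h w : Nat} {g : List (List Int)} {m : List (Int × Int)}
    (hs : pvShape g h w) (hm : ∀ x ∈ m, pvIsValid x.1 x.2 g = true) :
    ∀ x ∈ m, pvInB h w x := by
  intro x hx
  have := (pv_isValid_iff hs x.1 x.2).mp (hm x hx)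
  simpa using this.1

lemma pv_level_eq {h w : Nat} :
    ∀ (Q : List (Int × Int)) (g : List (List Int)) (rest : List (Int × Int))
      (al : PySem.Set (Int × Int)), pvShape g h w →
    pvLevel Q.length (g, Q ++ rest, al)
      = (pvMark g (pvLvlMarks g Q), rest ++ pvLvlMarks g Q, pvDAll al (pvLvlMarks g Q)) := by
  intro Q
  induction Q with
  | nil => intro g rest al _; simp [pvLevel, pvLvlMarks, pvMark, pvDAll]
  | cons c Q' ih =>
    intro g rest al hs
    have hstep : pvLevel (c :: Q').length (g, (c :: Q') ++ rest, al)
        = pvLevel Q'.length (pvVisit (g, Q' ++ rest, al) c.1 c.2) := by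
      simp [pvLevel]
    rw [hstep, pv_visit_eq hs c]
    set m := (pvNbrs c).filter (fun n => pvIsValid n.1 n.2 g) with hm
    have hmv : ∀ x ∈ m, pvIsValid x.1 x.2 g = true := by
      intro x hx
      exact (List.mem_filter.mp hx).2
    have hs1 : pvShape (pvMark g m) h w := pv_shape_mark hs (pv_marks_inB hs hmv)
    rw [List.append_assoc, ih (pvMark g m) (rest ++ m) _ hs1]
    have hlm : pvLvlMarks g (c :: Q') = m ++ pvLvlMarks (pvMark g m) Q' := by
      simp [pvLvlMarks, hm]
    rw [hlm, pv_mark_append]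
    refine congrArg₂ _ rfl (congrArg₂ _ ?_ ?_)
    · simp
    · simp [pvDAll]

lemma pv_isValid_mark {g : List (List Int)} {h w : Nat} {m : List (Int × Int)}
    (hs : pvShape g h w) (hmB : ∀ t ∈ m, pvInB h w t) (c : Int × Int) :
    pvIsValid c.1 c.2 (pvMark g m) = true ↔ pvIsValid c.1 c.2 g = true ∧ c ∉ m := by
  rw [pv_isValid_iff (pv_shape_mark hs hmB), pv_isValid_iff hs]
  by_cases hc : pvInB h w c
  · rw [show ((c.1, c.2) : Int × Int) = c from rfl, pv_cell_mark hs hmB hc]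
    by_cases hm : c ∈ m <;> simp [hm, hc]
  · rw [show ((c.1, c.2) : Int × Int) = c from rfl]
    tauto

lemma pv_lvlMarks_mem {h w : Nat} :
    ∀ (Q : List (Int × Int)) (g : List (List Int)), pvShape g h w → ∀ c : Int × Int,
      (c ∈ pvLvlMarks g Q ↔ pvIsValid c.1 c.2 g = true ∧ ∃ q ∈ Q, c ∈ pvNbrs q) := by
  intro Q
  induction Q with
  | nil => intro g _ c; simp [pvLvlMarks]
  | cons q0 Q' ih =>
    intro g hs c
    have hm0v : ∀ x ∈ (pvNbrs q0).filter (fun n => pvIsValid n.1 n.2 g),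
        pvIsValid x.1 x.2 g = true := fun x hx => (List.mem_filter.mp hx).2
    have hm0B := pv_marks_inB hs hm0v
    have hs1 := pv_shape_mark hs hm0B
    have hcons : pvLvlMarks g (q0 :: Q')
        = (pvNbrs q0).filter (fun n => pvIsValid n.1 n.2 g)
          ++ pvLvlMarks (pvMark g ((pvNbrs q0).filter (fun n => pvIsValid n.1 n.2 g))) Q' := rfl
    rw [hcons, List.mem_append, ih _ hs1 c, pv_isValid_mark hs hm0B c]
    have hm0c : c ∈ (pvNbrs q0).filter (fun n => pvIsValid n.1 n.2 g)
        ↔ (pvIsValid c.1 c.2 g = true ∧ c ∈ pvNbrs q0) := by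
      rw [List.mem_filter]; tauto
    have hex : (∃ q ∈ q0 :: Q', c ∈ pvNbrs q)
        ↔ (c ∈ pvNbrs q0 ∨ ∃ q ∈ Q', c ∈ pvNbrs q) := by
      simp
    rw [hex, hm0c]
    tauto

lemma pv_lvlMarks_nodup {h w : Nat} :
    ∀ (Q : List (Int × Int)) (g : List (List Int)), pvShape g h w →
      (pvLvlMarks g Q).Nodup := by
  intro Q
  induction Q with
  | nil => intro g _; simp [pvLvlMarks]
  | cons q0 Q' ih =>
    intro g hs
    have hm0v : ∀ x ∈ (pvNbrs q0).filter (fun n => pvIsValid n.1 n.2 g),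
        pvIsValid x.1 x.2 g = true := fun x hx => (List.mem_filter.mp hx).2
    have hm0B := pv_marks_inB hs hm0v
    have hs1 := pv_shape_mark hs hm0B
    have hcons : pvLvlMarks g (q0 :: Q')
        = (pvNbrs q0).filter (fun n => pvIsValid n.1 n.2 g)
          ++ pvLvlMarks (pvMark g ((pvNbrs q0).filter (fun n => pvIsValid n.1 n.2 g))) Q' := rfl
    rw [hcons, List.nodup_append]
    refine ⟨List.Nodup.filter _ (pv_nbrs_pairwise q0), ih _ hs1, ?_⟩
    intro x hx y hy
    rintro rfl
    have := ((pv_lvlMarks_mem Q' _ hs1 x).mp hy).1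
    exact ((pv_isValid_mark hs hm0B x).mp this).2 hx

lemma pv_nbr_symm (z c : Int × Int) : z ∈ pvNbrs c ↔ c ∈ pvNbrs z := by
  simp [pvNbrs, pvDirs, Prod.ext_iff]
  omega

lemma pv_hasZnbr_iff (g : List (List Int)) (h w : Nat) (i j : Int) :
    pvHasZnbr g h w i j = true
      ↔ ∃ z ∈ pvNbrs (i, j), pvInB h w z ∧ pvCellD g z.1 z.2 = 1 := by
  simp [pvHasZnbr, pvNbrs, pvInB, and_assoc]

lemma pv_targets_mem {g : List (List Int)} {h w : Nat} (c : Int × Int) :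
    c ∈ pvTargets g h w
      ↔ pvInB h w c ∧ pvCellD g c.1 c.2 = 0
          ∧ ∃ z ∈ pvNbrs c, pvInB h w z ∧ pvCellD g z.1 z.2 = 1 := by
  simp only [pvTargets, List.mem_flatMap, List.mem_filterMap,
    Option.ite_none_right_eq_some, Option.some.injEq]
  constructor
  · rintro ⟨i, hi, j, hj, hcond, rfl⟩
    have hi' := List.mem_range.mp hi
    have hj' := List.mem_range.mp hj
    simp only [Bool.and_eq_true, beq_iff_eq] at hcond
    refine ⟨⟨by simp, by simp; omega, by simp, by simp; omega⟩, hcond.1, ?_⟩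
    exact (pv_hasZnbr_iff g h w (i : Int) (j : Int)).mp hcond.2
  · rintro ⟨hcB, hcell, hz⟩
    obtain ⟨a, b, rfl, ha, hb⟩ := pvInB_cast hcB
    refine ⟨a, List.mem_range.mpr ha, b, List.mem_range.mpr hb, ?_, rfl⟩
    simp only [Bool.and_eq_true, beq_iff_eq]
    exact ⟨hcell, (pv_hasZnbr_iff g h w (a : Int) (b : Int)).mpr hz⟩

lemma pv_targets_nodup (g : List (List Int)) (h w : Nat) : (pvTargets g h w).Nodup := by
  rw [pvTargets, List.nodup_flatMap]
  constructor
  · intro i _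
    apply List.Nodup.filterMap
    · intro a a' b hb hb'
      simp only [Option.mem_def, Option.ite_none_right_eq_some, Option.some.injEq] at hb hb'
      have := hb.2.trans hb'.2.symm
      simpa using this
    · exact List.nodup_range
  · rw [List.pairwise_iff_forall_sublist]
    rintro i₁ i₂ hsub
    have hne : i₁ ≠ i₂ := by
      have := hsub.nodup List.nodup_range
      simp [List.nodup_cons] at this
      exact this
    intro x hx₁ hx₂
    simp only [List.mem_filterMap] at hx₁ hx₂
    obtain ⟨j₁, _, hj₁⟩ := hx₁
    obtain ⟨j₂, _, hj₂⟩ := hx₂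
    rw [Option.ite_none_right_eq_some] at hj₁ hj₂
    have := hj₁.2.trans hj₂.2.symm
    simp only [Option.some.injEq, Prod.mk.injEq, Int.natCast_inj] at this
    exact hne this.1

lemma pv_anyCell_iff (g : List (List Int)) (h w : Nat) (v : Int) :
    pvAnyCell g h w v = true ↔ ∃ c, pvInB h w c ∧ pvCellD g c.1 c.2 = v := by
  simp only [pvAnyCell, List.any_eq_true, List.mem_range, beq_iff_eq]
  constructor
  · rintro ⟨i, hi, j, hj, hc⟩
    exact ⟨((i : Int), (j : Int)), ⟨by simp, by simp; omega, by simp, by simp; omega⟩, hc⟩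
  · rintro ⟨c, hcB, hc⟩
    obtain ⟨a, b, rfl, ha, hb⟩ := pvInB_cast hcB
    exact ⟨a, ha, b, hb, hc⟩

lemma pv_coords_mem (h w : Nat) (c : Int × Int) : c ∈ pvCoords h w ↔ pvInB h w c := by
  simp only [pvCoords, List.mem_flatMap, List.mem_map, List.mem_range]
  constructor
  · rintro ⟨i, hi, j, hj, rfl⟩
    exact ⟨by simp, by simp; omega, by simp, by simp; omega⟩
  · intro hcB
    obtain ⟨a, b, rfl, ha, hb⟩ := pvInB_cast hcB
    exact ⟨a, ha, b, hb, rfl⟩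

lemma pv_countP_lt {α : Type} (p p' : α → Bool) (l : List α)
    (hmono : ∀ x ∈ l, p' x = true → p x = true) (x0 : α) (hx0 : x0 ∈ l)
    (hp : p x0 = true) (hp' : ¬ p' x0 = true) : l.countP p' < l.countP p := by
  induction l with
  | nil => simp at hx0
  | cons a l ih =>
    rw [List.countP_cons, List.countP_cons]
    rcases List.mem_cons.mp hx0 with rfl | hx0'
    · have hle : l.countP p' ≤ l.countP p :=
        List.countP_mono_left (fun x hx => hmono x (by simp [hx]))
      simp [hp, hp']
      omega
    · have hlt := ih (fun x hx => hmono x (by simp [hx])) hx0'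
      have : (if p' a then 1 else 0) ≤ (if p a then 1 else 0) := by
        by_cases hpa : p' a = true
        · simp [hpa, hmono a (by simp) hpa]
        · simp [hpa]
      omega

lemma pv_pcnt_le (g : List (List Int)) (h w : Nat) : pvPcnt g h w ≤ h * w := by
  have h1 : pvPcnt g h w ≤ (pvCoords h w).length := List.countP_le_length
  have h2 : (pvCoords h w).length = h * w := by
    simp [pvCoords, List.length_flatMap]
  omega

lemma pv_pcnt_lt {g : List (List Int)} {h w : Nat} {m : List (Int × Int)}
    (hs : pvShape g h w) (hmB : ∀ t ∈ m, pvInB h w t) (x0 : Int × Int) (hx0 : x0 ∈ m)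
    (hc0 : pvCellD g x0.1 x0.2 = 0) : pvPcnt (pvMark g m) h w < pvPcnt g h w := by
  have key := pv_countP_lt (p := fun c => pvCellD g c.1 c.2 == 0)
    (p' := fun c => pvCellD (pvMark g m) c.1 c.2 == 0) (l := pvCoords h w)
    ?hmono x0 ((pv_coords_mem h w x0).mpr (hmB x0 hx0)) ?hp ?hp'
  · exact key
  case hmono =>
    intro c hcmem hc'
    have hcB := (pv_coords_mem h w c).mp hcmem
    rw [beq_iff_eq, pv_cell_mark hs hmB hcB] at hc'
    by_cases hm : c ∈ m
    · simp [hm] at hc'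
    · simpa [hm] using hc'
  case hp => simpa using hc0
  case hp' =>
    rw [beq_iff_eq, pv_cell_mark hs hmB (hmB x0 hx0)]
    simp [hx0]

-- seed characterization
lemma pv_seed_row_mem (g : List (List Int)) (i : Nat) :
    ∀ (cols : List Nat) (s : List (Int × Int) × PySem.Set (Int × Int)) (c : Int × Int),
      (c ∈ (cols.foldl (fun st (j : Nat) =>
          ((if pvCellD g (i : Int) (j : Int) == 1 then st.1 ++ [((i : Int), (j : Int))] else st.1),
           (if pvCellD g (i : Int) (j : Int) == 0 then PySem.Set.add st.2 ((i : Int), (j : Int)) else st.2))) s).1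
        ↔ c ∈ s.1 ∨ ∃ j ∈ cols, pvCellD g (i : Int) (j : Int) = 1 ∧ c = ((i : Int), (j : Int)))
      ∧ (c ∈ (cols.foldl (fun st (j : Nat) =>
          ((if pvCellD g (i : Int) (j : Int) == 1 then st.1 ++ [((i : Int), (j : Int))] else st.1),
           (if pvCellD g (i : Int) (j : Int) == 0 then PySem.Set.add st.2 ((i : Int), (j : Int)) else st.2))) s).2
        ↔ c ∈ s.2 ∨ ∃ j ∈ cols, pvCellD g (i : Int) (j : Int) = 0 ∧ c = ((i : Int), (j : Int))) := by
  intro cols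
  induction cols with
  | nil => intro s c; simp
  | cons j js ih =>
    intro s c
    rw [List.foldl_cons]
    have hstep1 : c ∈ ((if pvCellD g (i : Int) (j : Int) == 1 then s.1 ++ [((i : Int), (j : Int))] else s.1))
        ↔ c ∈ s.1 ∨ (pvCellD g (i : Int) (j : Int) = 1 ∧ c = ((i : Int), (j : Int))) := by
      by_cases h1 : pvCellD g (i : Int) (j : Int) = 1 <;> simp [h1]
    have hstep0 : c ∈ ((if pvCellD g (i : Int) (j : Int) == 0 then PySem.Set.add s.2 ((i : Int), (j : Int)) else s.2))
        ↔ c ∈ s.2 ∨ (pvCellD g (i : Int) (j : Int) = 0 ∧ c = ((i : Int), (j : Int))) := by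
      by_cases h0 : pvCellD g (i : Int) (j : Int) = 0
      · simp [h0, PySem.Set.mem_add]
      · simp [h0]
    constructor
    · rw [(ih _ c).1, hstep1]
      simp only [List.mem_cons]
      constructor
      · rintro ((hc | ⟨hv, rfl⟩) | ⟨j', hj', hv, rfl⟩)
        · exact Or.inl hc
        · exact Or.inr ⟨j, Or.inl rfl, hv, rfl⟩
        · exact Or.inr ⟨j', Or.inr hj', hv, rfl⟩
      · rintro (hc | ⟨j', hj' | hj', hv, rfl⟩)
        · exact Or.inl (Or.inl hc)
        · subst hj'; exact Or.inl (Or.inr ⟨hv, rfl⟩)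
        · exact Or.inr ⟨j', hj', hv, rfl⟩
    · rw [(ih _ c).2, hstep0]
      simp only [List.mem_cons]
      constructor
      · rintro ((hc | ⟨hv, rfl⟩) | ⟨j', hj', hv, rfl⟩)
        · exact Or.inl hc
        · exact Or.inr ⟨j, Or.inl rfl, hv, rfl⟩
        · exact Or.inr ⟨j', Or.inr hj', hv, rfl⟩
      · rintro (hc | ⟨j', hj' | hj', hv, rfl⟩)
        · exact Or.inl (Or.inl hc)
        · subst hj'; exact Or.inl (Or.inr ⟨hv, rfl⟩)
        · exact Or.inr ⟨j', hj', hv, rfl⟩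

lemma pv_seed_fold_mem (g : List (List Int)) :
    ∀ (rows : List Nat) (cols : List Nat) (s : List (Int × Int) × PySem.Set (Int × Int)) (c : Int × Int),
      (c ∈ (rows.foldl (fun st (i : Nat) => cols.foldl (fun st (j : Nat) =>
          ((if pvCellD g (i : Int) (j : Int) == 1 then st.1 ++ [((i : Int), (j : Int))] else st.1),
           (if pvCellD g (i : Int) (j : Int) == 0 then PySem.Set.add st.2 ((i : Int), (j : Int)) else st.2))) st) s).1
        ↔ c ∈ s.1 ∨ ∃ i ∈ rows, ∃ j ∈ cols, pvCellD g (i : Int) (j : Int) = 1 ∧ c = ((i : Int), (j : Int)))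
      ∧ (c ∈ (rows.foldl (fun st (i : Nat) => cols.foldl (fun st (j : Nat) =>
          ((if pvCellD g (i : Int) (j : Int) == 1 then st.1 ++ [((i : Int), (j : Int))] else st.1),
           (if pvCellD g (i : Int) (j : Int) == 0 then PySem.Set.add st.2 ((i : Int), (j : Int)) else st.2))) st) s).2
        ↔ c ∈ s.2 ∨ ∃ i ∈ rows, ∃ j ∈ cols, pvCellD g (i : Int) (j : Int) = 0 ∧ c = ((i : Int), (j : Int))) := by
  intro rows
  induction rows with
  | nil => intro cols s c; simp
  | cons i is ih =>
    intro cols s c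
    rw [List.foldl_cons]
    constructor
    · rw [(ih cols _ c).1, (pv_seed_row_mem g i cols s c).1]
      simp only [List.mem_cons]
      constructor
      · rintro ((hc | ⟨j, hj, hv, rfl⟩) | ⟨i', hi', j, hj, hv, rfl⟩)
        · exact Or.inl hc
        · exact Or.inr ⟨i, Or.inl rfl, j, hj, hv, rfl⟩
        · exact Or.inr ⟨i', Or.inr hi', j, hj, hv, rfl⟩
      · rintro (hc | ⟨i', hi' | hi', j, hj, hv, rfl⟩)
        · exact Or.inl (Or.inl hc)
        · subst hi'; exact Or.inl (Or.inr ⟨j, hj, hv, rfl⟩)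
        · exact Or.inr ⟨i', hi', j, hj, hv, rfl⟩
    · rw [(ih cols _ c).2, (pv_seed_row_mem g i cols s c).2]
      simp only [List.mem_cons]
      constructor
      · rintro ((hc | ⟨j, hj, hv, rfl⟩) | ⟨i', hi', j, hj, hv, rfl⟩)
        · exact Or.inl hc
        · exact Or.inr ⟨i, Or.inl rfl, j, hj, hv, rfl⟩
        · exact Or.inr ⟨i', Or.inr hi', j, hj, hv, rfl⟩
      · rintro (hc | ⟨i', hi' | hi', j, hj, hv, rfl⟩)
        · exact Or.inl (Or.inl hc)
        · subst hi'; exact Or.inl (Or.inr ⟨j, hj, hv, rfl⟩)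
        · exact Or.inr ⟨i', hi', j, hj, hv, rfl⟩

lemma pv_seed_q {g : List (List Int)} {h w : Nat} (hs : pvShape g h w) (c : Int × Int) :
    c ∈ (pvSeed g).1 ↔ pvInB h w c ∧ pvCellD g c.1 c.2 = 1 := by
  obtain ⟨hlen, hw0, -⟩ := hs
  have key : c ∈ (pvSeed g).1 ↔ c ∈ ([] : List (Int × Int)) ∨
      ∃ i ∈ List.range g.length, ∃ j ∈ List.range (g.headD []).length,
        pvCellD g (i : Int) (j : Int) = 1 ∧ c = ((i : Int), (j : Int)) :=
    (pv_seed_fold_mem g (List.range g.length) (List.range (g.headD []).length) ([], []) c).1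
  rw [key]
  simp only [List.not_mem_nil, false_or, List.mem_range, hlen, hw0]
  constructor
  · rintro ⟨i, hi, j, hj, hcell, rfl⟩
    exact ⟨⟨by simp, by simp; omega, by simp, by simp; omega⟩, hcell⟩
  · rintro ⟨hcB, hcell⟩
    obtain ⟨a, b, rfl, ha, hb⟩ := pvInB_cast hcB
    exact ⟨a, ha, b, hb, hcell, rfl⟩

lemma pv_seed_al {g : List (List Int)} {h w : Nat} (hs : pvShape g h w) (c : Int × Int) :
    c ∈ (pvSeed g).2 ↔ pvInB h w c ∧ pvCellD g c.1 c.2 = 0 := by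
  obtain ⟨hlen, hw0, -⟩ := hs
  have key : c ∈ (pvSeed g).2 ↔ c ∈ ([] : List (Int × Int)) ∨
      ∃ i ∈ List.range g.length, ∃ j ∈ List.range (g.headD []).length,
        pvCellD g (i : Int) (j : Int) = 0 ∧ c = ((i : Int), (j : Int)) :=
    (pv_seed_fold_mem g (List.range g.length) (List.range (g.headD []).length) ([], []) c).2
  rw [key]
  simp only [List.not_mem_nil, false_or, List.mem_range, hlen, hw0]
  constructor
  · rintro ⟨i, hi, j, hj, hcell, rfl⟩
    exact ⟨⟨by simp, by simp; omega, by simp, by simp; omega⟩, hcell⟩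
  · rintro ⟨hcB, hcell⟩
    obtain ⟨a, b, rfl, ha, hb⟩ := pvInB_cast hcB
    exact ⟨a, ha, b, hb, hcell, rfl⟩

-- the BFS loop invariant relating A's state (g, Q, alive) to B's state (g)
def pvInv (g : List (List Int)) (h w : Nat) (Q : List (Int × Int))
    (al : PySem.Set (Int × Int)) : Prop :=
  pvShape g h w ∧
  (∀ c ∈ Q, pvInB h w c ∧ pvCellD g c.1 c.2 = 1) ∧
  (∀ z, pvInB h w z → pvCellD g z.1 z.2 = 1 → z ∉ Q →
     ∀ c ∈ pvNbrs z, pvInB h w c → pvCellD g c.1 c.2 ≠ 0) ∧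
  (∀ c, c ∈ al ↔ pvInB h w c ∧ pvCellD g c.1 c.2 = 0)

lemma pv_main {h w : Nat} :
    ∀ (fA fB : Nat) (g : List (List Int)) (Q : List (Int × Int))
      (al : PySem.Set (Int × Int)) (day : Int),
      pvInv g h w Q al → Q ≠ [] → pvPcnt g h w < fA → pvPcnt g h w < fB →
      pvALoop fA g Q al day = pvBLoop fB g h w day := by
  intro fA
  induction fA with
  | zero => intro fB g Q al day _ _ hfa _; omega
  | succ fA ih =>
    intro fB g Q al day hinv hQ hfa hfb
    obtain ⟨hs, hI1, hI2, hI3⟩ := hinv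
    cases fB with
    | zero => omega
    | succ fB =>
    have hQb : Q.isEmpty = false := by
      cases Q with
      | nil => exact absurd rfl hQ
      | cons a l => rfl
    have hlev := pv_level_eq Q g [] al hs
    rw [List.append_nil] at hlev
    set M := pvLvlMarks g Q with hMdef
    set ts := pvTargets g h w with htsdef
    have hMval : ∀ c ∈ M, pvIsValid c.1 c.2 g = true :=
      fun c hc => ((pv_lvlMarks_mem Q g hs c).mp hc).1
    have hMB : ∀ c ∈ M, pvInB h w c := pv_marks_inB hs hMval
    have hMcell : ∀ c ∈ M, pvCellD g c.1 c.2 = 0 := by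
      intro c hc
      have := (pv_isValid_iff hs c.1 c.2).mp (hMval c hc)
      exact this.2
    have htsB : ∀ c ∈ ts, pvInB h w c := fun c hc => (pv_targets_mem c).mp hc |>.1
    have hMts : ∀ c, c ∈ M ↔ c ∈ ts := by
      intro c
      rw [pv_lvlMarks_mem Q g hs c, pv_targets_mem c]
      constructor
      · rintro ⟨hv, q, hq, hnb⟩
        have hvc := (pv_isValid_iff hs c.1 c.2).mp hv
        obtain ⟨hqB, hq1⟩ := hI1 q hq
        exact ⟨hvc.1, hvc.2, q, (pv_nbr_symm q c).mpr hnb, hqB, hq1⟩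
      · rintro ⟨hcB, hc0, z, hznb, hzB, hz1⟩
        have hv : pvIsValid c.1 c.2 g = true := by
          rw [pv_isValid_iff hs]
          exact ⟨hcB, hc0⟩
        by_cases hzQ : z ∈ Q
        · exact ⟨hv, z, hzQ, (pv_nbr_symm z c).mp hznb⟩
        · exact absurd hc0 (hI2 z hzB hz1 hzQ c ((pv_nbr_symm z c).mp hznb) hcB)
    have hMperm : M.Perm ts :=
      (List.perm_ext_iff_of_nodup (pv_lvlMarks_nodup Q g hs) (pv_targets_nodup g h w)).mpr hMts
    have hgEq : pvMark g M = pvMark g ts := pv_mark_perm hs hMB hMperm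
    have hs' : pvShape (pvMark g M) h w := pv_shape_mark hs hMB
    have hcell' : ∀ c, pvInB h w c →
        pvCellD (pvMark g M) c.1 c.2 = if c ∈ M then 1 else pvCellD g c.1 c.2 :=
      fun c hc => pv_cell_mark hs hMB hc
    have hal' : ∀ c, c ∈ pvDAll al M ↔ pvInB h w c ∧ pvCellD (pvMark g M) c.1 c.2 = 0 := by
      intro c
      rw [pv_dall_mem, hI3]
      by_cases hcB : pvInB h w c
      · rw [hcell' c hcB]
        by_cases hcM : c ∈ M <;> simp [hcM, hcB]
      · simp [hcB]
    have hempty : (pvDAll al M).isEmpty = !pvAnyCell (pvMark g M) h w 0 := by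
      rw [Bool.eq_iff_iff]
      simp only [List.isEmpty_iff, Bool.not_eq_true', ← Bool.not_eq_true]
      rw [List.eq_nil_iff_forall_not_mem, pv_anyCell_iff]
      constructor
      · intro hno hex
        obtain ⟨c, hcB, hc0⟩ := hex
        exact hno c ((hal' c).mpr ⟨hcB, hc0⟩)
      · intro hno c hc
        exact hno ⟨c, (hal' c).mp hc⟩
    -- unfold one iteration of each loop
    rw [show pvALoop (fA + 1) g Q al day
          = (if Q.isEmpty then (-1 : Int)
             else
               let st := pvLevel Q.length (g, Q, al)
               if st.2.2.isEmpty then day + 1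
               else pvALoop fA st.1 st.2.1 st.2.2 (day + 1)) from rfl,
        show pvBLoop (fB + 1) g h w day
          = (let ts' := pvTargets g h w
             let g' := pvMark g ts'
             if !pvAnyCell g' h w 0 then day + 1
             else if ts'.isEmpty then (-1 : Int)
             else pvBLoop fB g' h w (day + 1)) from rfl]
    simp only [hQb, Bool.false_eq_true, if_false, hlev, ← htsdef, ← hgEq]
    rw [hempty]
    cases hae : pvAnyCell (pvMark g M) h w 0 with
    | false => simp
    | true =>
      simp only [Bool.not_true, Bool.false_eq_true, if_false]
      -- some empty cell remains
      have hpos : 0 < pvPcnt g h w := by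
        obtain ⟨c, hcB, hc0⟩ := (pv_anyCell_iff _ h w 0).mp hae
        have hc0g : pvCellD g c.1 c.2 = 0 := by
          rw [hcell' c hcB] at hc0
          by_cases hcM : c ∈ M
          · simp [hcM] at hc0
          · simpa [hcM] using hc0
        rw [pvPcnt, List.countP_pos_iff]
        exact ⟨c, (pv_coords_mem h w c).mpr hcB, by simpa using hc0g⟩
      by_cases hMnil : M = []
      · have htsnil : ts = [] := by
          rw [List.eq_nil_iff_forall_not_mem]
          intro c hc
          rw [← hMts c] at hc
          simp [hMnil] at hc
        have hgM : pvMark g M = g := by rw [hMnil]; rfl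
        rw [htsnil, hMnil]
        simp only [List.isEmpty_nil, if_true]
        cases fA with
        | zero => omega
        | succ fA' => rfl
      · have htsne : ts.isEmpty = false := by
          obtain ⟨m0, hm0⟩ := List.exists_mem_of_ne_nil M hMnil
          have : m0 ∈ ts := (hMts m0).mp hm0
          cases hts0 : ts with
          | nil => rw [hts0] at this; simp at this
          | cons a l => rfl
        rw [htsne]
        simp only [Bool.false_eq_true, if_false]
        obtain ⟨m0, hm0⟩ := List.exists_mem_of_ne_nil M hMnil
        have hdec : pvPcnt (pvMark g M) h w < pvPcnt g h w :=
          pv_pcnt_lt hs hMB m0 hm0 (hMcell m0 hm0)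
        apply ih fB (pvMark g M) M (pvDAll al M) (day + 1) ?_ hMnil (by omega) (by omega)
        refine ⟨hs', ?_, ?_, hal'⟩
        · intro c hc
          refine ⟨hMB c hc, ?_⟩
          rw [hcell' c (hMB c hc)]
          simp [hc]
        · intro z hzB hz1 hzM c hcnb hcB hc0
          rw [hcell' c hcB] at hc0
          by_cases hcM : c ∈ M
          · simp [hcM] at hc0
          · simp only [hcM, if_false] at hc0
            rw [hcell' z hzB] at hz1
            simp only [hzM, if_false] at hz1
            -- z was already a zombie in g
            by_cases hzQ : z ∈ Q
            · -- then c would have been marked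
              apply hcM
              rw [pv_lvlMarks_mem Q g hs c]
              exact ⟨(pv_isValid_iff hs c.1 c.2).mpr ⟨hcB, hc0⟩, z, hzQ, hcnb⟩
            · exact hI2 z hzB hz1 hzQ c hcnb hcB hc0

-- ===== VERDICT (by name: the statement is the Claim_ definition above) =====
theorem zombie_spec : Claim_equal_zombie := by
  unfold Claim_equal_zombie
  intro grid _ hpre
  unfold Spec_zombie zombie zombie_alt
  by_cases hguard : (grid.isEmpty || (grid.headD []).isEmpty) = true
  · rw [if_pos hguard, if_pos hguard]
  · rw [if_neg hguard, if_neg hguard]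
    have hs : pvShape grid grid.length (grid.headD []).length := ⟨rfl, rfl, hpre⟩
    show pvALoop (grid.length * (grid.headD []).length + 1) grid (pvSeed grid).1 (pvSeed grid).2 0
        = (if !pvAnyCell grid grid.length (grid.headD []).length 1 then (-1 : Int)
           else pvBLoop (grid.length * (grid.headD []).length + 1) grid grid.length
             (grid.headD []).length 0)
    by_cases hz : pvAnyCell grid grid.length (grid.headD []).length 1 = true
    · rw [hz]
      simp only [Bool.not_true, Bool.false_eq_true, if_false]
      have hQne : (pvSeed grid).1 ≠ [] := by
        obtain ⟨c, hcB, hc1⟩ := (pv_anyCell_iff grid grid.length (grid.headD []).length 1).mp hz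
        intro hnil
        have := (pv_seed_q hs c).mpr ⟨hcB, hc1⟩
        rw [hnil] at this
        simp at this
      have hfuel : pvPcnt grid grid.length (grid.headD []).length
          < grid.length * (grid.headD []).length + 1 := by
        have := pv_pcnt_le grid grid.length (grid.headD []).length
        omega
      apply pv_main _ _ _ _ _ _ ?_ hQne hfuel hfuel
      refine ⟨hs, fun c hc => (pv_seed_q hs c).mp hc, ?_, fun c => pv_seed_al hs c⟩
      intro z hzB hz1 hzQ
      exact absurd ((pv_seed_q hs z).mpr ⟨hzB, hz1⟩) hzQ
    · have hzf : pvAnyCell grid grid.length (grid.headD []).length 1 = false :=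
        Bool.eq_false_iff.mpr hz
      rw [hzf]
      simp only [Bool.not_false, if_true]
      have hQnil : (pvSeed grid).1 = [] := by
        rw [List.eq_nil_iff_forall_not_mem]
        intro c hc
        have hcq := (pv_seed_q hs c).mp hc
        exact hz ((pv_anyCell_iff grid grid.length (grid.headD []).length 1).mpr ⟨c, hcq.1, hcq.2⟩)
      rw [hQnil]
      rfl
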